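-- pv_equiv track=rewrite | github.com/mxiimy/Leetcode | AmazonOAs/SmallestLexicalPalindrome.py | getKeyIdentifier
-- ===== SOURCE A (Python) =====
-- def getKeyIdentifier(key: str)->str:
--     if len(key)<=1:
--         return key
--     chars = []
--     for char in key:
--         chars.append(char)
--     chars.sort()
--     s = []
--     e = []
--     mid = []
--     while len(chars)>1:
--         if chars[0] == chars[1]:
--             s.append(chars[0])
--             e.append(chars[1])
--             chars = chars[2:]
--         else:
--             mid.append(chars[0])
--             chars = chars[1:]
--     midi = len(s) //2
--     e.reverse()
--
--     if len(chars) > 0: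
--         joined = s + chars + e
--         return ''.join(joined)
--     elif len(mid) > 0:
--         joined = s + mid + e
--         return ''.join(joined)
--     else:
--         joined = s + e
--         return ''.join(joined)
-- ===== SOURCE B (Python) =====
-- def getKeyIdentifier(key: str) -> str:
--     # Single pass over the sorted characters with a pending slot: each character
--     # either completes a pair (one copy goes to half) or displaces the previous
--     # pending character into the loners list. The centre is the character still
--     # pending at the end, or else the loners.
--     if len(key) <= 1:
--         return key
--     half = []
--     loners = []
--     pending = None
--     for c in sorted(key):
--         if c == pending:
--             half.append(c)
--             pending = None
--         else:
--             if pending is not None: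
--                 loners.append(pending)
--             pending = c
--     h = ''.join(half)
--     center = [pending] if pending is not None else loners
--     return h + ''.join(center) + h[::-1]
-- ===== Notes on version B (the rewrite author's own statement) =====
-- stated objective: faster
-- what changed: Replaces A's while-loop that repeatedly reslices the character list (chars[2:]/chars[1:]) and its two-element lookahead by a single left-to-right fold over the sorted characters carrying a pending slot: a character either completes a pair or displaces the pending one into the loners list, and the final pending character (else the loners) forms the centre.
import Mathlib
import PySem

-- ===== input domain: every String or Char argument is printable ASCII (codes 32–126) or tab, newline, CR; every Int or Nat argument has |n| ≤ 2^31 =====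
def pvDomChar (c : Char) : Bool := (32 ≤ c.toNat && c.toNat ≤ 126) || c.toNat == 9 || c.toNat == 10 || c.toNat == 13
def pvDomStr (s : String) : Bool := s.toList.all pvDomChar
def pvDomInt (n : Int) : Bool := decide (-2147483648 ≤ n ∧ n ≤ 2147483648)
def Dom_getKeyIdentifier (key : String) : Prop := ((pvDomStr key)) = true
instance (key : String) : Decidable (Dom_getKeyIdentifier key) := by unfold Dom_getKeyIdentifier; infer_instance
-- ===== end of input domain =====

-- B replaces A's slice-and-reconsume while loop by a single fold over the sorted
-- characters carrying a pending slot (objective: faster, no repeated list slicing).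


-- ===== PORT A =====
-- A's while-loop: state (chars, s, e, mid); two equal leading chars are paired into s/e,
-- otherwise the leading char moves to mid (chars[2:] / chars[1:] are the match tails)
def pvLoopA : List Char → List Char → List Char → List Char →
    List Char × List Char × List Char × List Char
  | a :: b :: rest, s, e, mid =>
    if a = b then pvLoopA rest (s ++ [a]) (e ++ [b]) mid
    else pvLoopA (b :: rest) s e (mid ++ [a])
  | chars, s, e, mid => (chars, s, e, mid)

def getKeyIdentifier (key : String) : String :=
  if PySem.Str.len key ≤ 1 then key
  else
    -- chars = []; for char in key: chars.append(char)
    let chars := key.toList.foldl (fun acc c => acc ++ [c]) []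
    -- chars.sort()
    let chars := PySem.List.sorted chars (fun c => c)
    let r := pvLoopA chars [] [] []
    let chars := r.1
    let s := r.2.1
    let mid := r.2.2.2
    -- midi = len(s)//2 is dead code in A (never read); not ported
    let e := r.2.2.1.reverse
    if chars.length > 0 then String.ofList (s ++ chars ++ e)
    else if mid.length > 0 then String.ofList (s ++ mid ++ e)
    else String.ofList (s ++ e)

-- ===== PORT B =====
-- one fold over sorted(key) with state (half, loners, pending)
def getKeyIdentifier_alt (key : String) : String :=
  if PySem.Str.len key ≤ 1 then key
  else
    let st := (PySem.List.sorted key.toList (fun c => c)).foldl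
      (fun (acc : List Char × List Char × Option Char) c =>
        if some c = acc.2.2 then (acc.1 ++ [c], acc.2.1, none)
        else match acc.2.2 with
          | some p => (acc.1, acc.2.1 ++ [p], some c)
          | none => (acc.1, acc.2.1, some c))
      ([], [], none)
    let center := match st.2.2 with
      | some p => [p]
      | none => st.2.1
    String.ofList (st.1 ++ center ++ st.1.reverse)

-- ===== PRECONDITION & SPEC =====
def Spec_getKeyIdentifier (key : String) (out : String) : Prop := out = getKeyIdentifier_alt key
instance (key : String) (out : String) : Decidable (Spec_getKeyIdentifier key out) := by unfold Spec_getKeyIdentifier; infer_instance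

-- ===== CLAIM (what is proved, stated in full; the proofs are below) =====
def Claim_equal_getKeyIdentifier : Prop := ∀ (key : String), Dom_getKeyIdentifier key → Spec_getKeyIdentifier key (getKeyIdentifier key)

-- ===== LEMMAS AND PROOFS =====

-- accumulator-free core of A's loop: (remaining, half, mid)
def pvPr : List Char → List Char × List Char × List Char
  | a :: b :: t =>
    if a = b then ((pvPr t).1, a :: (pvPr t).2.1, (pvPr t).2.2)
    else ((pvPr (b :: t)).1, (pvPr (b :: t)).2.1, a :: (pvPr (b :: t)).2.2)
  | l => (l, [], [])

theorem pvLoopA_eq (chars s e mid : List Char) :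
    pvLoopA chars s e mid =
      ((pvPr chars).1, s ++ (pvPr chars).2.1, e ++ (pvPr chars).2.1, mid ++ (pvPr chars).2.2) := by
  fun_induction pvLoopA chars s e mid <;> simp_all [pvPr]

-- accumulator-free core of B's fold: input pending, list → (half, loners, final pending)
def pvM : Option Char → List Char → List Char × List Char × Option Char
  | p, [] => ([], [], p)
  | p, c :: t =>
    if some c = p then
      (c :: (pvM none t).1, (pvM none t).2.1, (pvM none t).2.2)
    else match p with
      | some x => ((pvM (some c) t).1, x :: (pvM (some c) t).2.1, (pvM (some c) t).2.2)
      | none => pvM (some c) t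

theorem pvFoldB_eq (l : List Char) (H L : List Char) (p : Option Char) :
    l.foldl
      (fun (acc : List Char × List Char × Option Char) c =>
        if some c = acc.2.2 then (acc.1 ++ [c], acc.2.1, none)
        else match acc.2.2 with
          | some x => (acc.1, acc.2.1 ++ [x], some c)
          | none => (acc.1, acc.2.1, some c))
      (H, L, p) = (H ++ (pvM p l).1, L ++ (pvM p l).2.1, (pvM p l).2.2) := by
  induction l generalizing H L p with
  | nil => simp [pvM]
  | cons c t ih =>
    simp only [List.foldl_cons]
    by_cases h : some c = p
    · simp only [h, if_pos rfl, ih, pvM, if_pos h]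
      simp
    · rcases p with _ | x
      · simp only [pvM, h, if_neg h, ih]
        simp
      · simp only [pvM, h, if_neg h, ih]
        simp

-- the two cores compute the same data (no sortedness needed: both compare adjacent items)
theorem pvM_none_eq_pvPr (l : List Char) :
    pvM none l = ((pvPr l).2.1, (pvPr l).2.2, (pvPr l).1.head?) := by
  fun_induction pvPr l with
  | case1 a t ih =>
    show pvM (some a) (a :: t) = _
    simp [pvM, ih]
  | case2 a b t h ih =>
    have hne : ¬ (some b = some a) := by simpa using fun hh => h hh.symm
    simp only [pvPr, if_neg h]
    show pvM (some a) (b :: t) = _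
    simp only [pvM, hne, if_neg hne]
    have h2 : pvM (some b) t = pvM none (b :: t) := by simp [pvM]
    simp [h2, ih]
  | case3 l h1 =>
    rcases l with _ | ⟨a, _ | ⟨b, t⟩⟩
    · simp [pvM, pvPr]
    · simp [pvM, pvPr]
    · exact absurd rfl (h1 a b t)

-- the leftover of A's loop has at most one element
theorem pvPr_rem (l : List Char) : (pvPr l).1 = [] ∨ ∃ x, (pvPr l).1 = [x] := by
  fun_induction pvPr l with
  | case1 a t ih => simpa [pvPr] using ih
  | case2 a b t h ih => simpa [pvPr, h] using ih
  | case3 l h1 =>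
    rcases l with _ | ⟨a, _ | ⟨b, t⟩⟩
    · exact Or.inl rfl
    · exact Or.inr ⟨a, rfl⟩
    · exact absurd rfl (h1 a b t)

theorem getKeyIdentifier_eq (key : String) : getKeyIdentifier key = getKeyIdentifier_alt key := by
  unfold getKeyIdentifier getKeyIdentifier_alt
  by_cases hlen : PySem.Str.len key ≤ 1
  · simp only [if_pos hlen]
  · simp only [hlen, ite_false]
    rw [PySem.List.foldl_append_singleton, List.nil_append]
    set l := PySem.List.sorted key.toList (fun c => c) with hl
    rw [pvLoopA_eq, pvFoldB_eq, pvM_none_eq_pvPr]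
    simp only [List.nil_append]
    rcases pvPr_rem l with h | ⟨x, h⟩
    · rcases hm : (pvPr l).2.2 with _ | ⟨c, cs⟩ <;> simp [h]
    · simp [h]

-- ===== VERDICT (by name: the statement is the Claim_ definition above) =====
theorem getKeyIdentifier_spec : Claim_equal_getKeyIdentifier := by
  intro key _
  unfold Spec_getKeyIdentifier
  exact getKeyIdentifier_eq key
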